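-- pv_equiv track=rewrite | github.com/kiyoteruhosoda/FlaskApp | core/tasks/transcode.py | _summarise_ffmpeg_error
-- ===== SOURCE A (Python) =====
-- from typing import Any, Dict, List, Optional, cast
--
-- def _summarise_ffmpeg_error(stderr: str) -> Optional[str]:
--     """Extract a human readable summary line from *stderr* output."""
--
--     if not stderr:
--         return None
--
--     candidates = [line.strip() for line in stderr.splitlines() if line.strip()]
--     priority = ("not divisible", "error", "failed", "invalid")
--     for keyword in priority:
--         for line in reversed(candidates):
--             if keyword in line.lower():
--                 return line
--
--     if candidates:
--         return candidates[-1]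
--     return None
-- ===== SOURCE B (Python) =====
-- def _summarise_ffmpeg_error(stderr):
--     """Extract a human readable summary line from *stderr* output."""
--     priority = ("not divisible", "error", "failed", "invalid")
--     best = {}
--     last = None
--     for raw in stderr.splitlines():
--         line = raw.strip()
--         if not line:
--             continue
--         last = line
--         low = line.lower()
--         for kw in priority:
--             if kw in low:
--                 best[kw] = line
--     for kw in priority:
--         if kw in best:
--             return best[kw]
--     return last
-- ===== Notes on version B (the rewrite author's own statement) =====
-- stated objective: alternative
-- what changed: Single forward pass over the lines maintaining a keyword->most-recent-matching-line dict (overwrite keeps the last occurrence) plus the last candidate, then one lookup pass over the priority tuple, instead of A's up-to-four reversed rescans of the candidate list.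
import Mathlib
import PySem

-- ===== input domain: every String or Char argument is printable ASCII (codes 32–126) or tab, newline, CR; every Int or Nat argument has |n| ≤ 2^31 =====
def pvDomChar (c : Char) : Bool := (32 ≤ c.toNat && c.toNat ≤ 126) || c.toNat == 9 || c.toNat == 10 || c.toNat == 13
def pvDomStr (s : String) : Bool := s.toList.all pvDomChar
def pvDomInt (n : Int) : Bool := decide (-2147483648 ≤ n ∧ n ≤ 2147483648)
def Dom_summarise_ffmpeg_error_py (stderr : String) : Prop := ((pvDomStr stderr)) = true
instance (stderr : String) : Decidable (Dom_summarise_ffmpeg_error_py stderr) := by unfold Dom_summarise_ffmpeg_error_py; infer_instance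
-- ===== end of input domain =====

-- B replaces A's four reversed rescans of the candidate list with one forward pass
-- keeping a keyword → most-recent-matching-line dict plus the last candidate (alternative decomposition).

-- the priority tuple, shared context constant of both programs
def pvPriority : List String := ["not divisible", "error", "failed", "invalid"]

-- ===== PORT A =====
def summarise_ffmpeg_error_py (stderr : String) : Option String :=
  if stderr = "" then none
  else
    let candidates := ((PySem.Str.splitlines stderr).map PySem.Str.strip).filter (fun l => l != "")
    match pvPriority.findSome?
        (fun kw => candidates.reverse.find? (fun l => PySem.Str.isIn kw (PySem.Str.lower l))) with
    | some l => some l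
    | none => candidates.getLast?

-- ===== PORT B =====
-- fold body of B's single forward pass: skip blank lines, record the line as `last`,
-- and overwrite the dict entry of every priority keyword contained in its lowercase form
def pvStepB (st : PySem.Dict String String × Option String) (raw : String) :
    PySem.Dict String String × Option String :=
  let line := PySem.Str.strip raw
  if line == "" then st
  else
    let low := PySem.Str.lower line
    (pvPriority.foldl (fun d kw => if PySem.Str.isIn kw low then d.insert kw line else d) st.1,
     some line)

def summarise_ffmpeg_error_py_alt (stderr : String) : Option String :=
  let st := (PySem.Str.splitlines stderr).foldl pvStepB (PySem.Dict.empty, none)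
  match pvPriority.findSome? (fun kw => st.1.get? kw) with
  | some l => some l
  | none => st.2

-- ===== PRECONDITION & SPEC =====
def Spec_summarise_ffmpeg_error_py (stderr : String) (out : Option String) : Prop := out = summarise_ffmpeg_error_py_alt stderr
instance (stderr : String) (out : Option String) : Decidable (Spec_summarise_ffmpeg_error_py stderr out) := by unfold Spec_summarise_ffmpeg_error_py; infer_instance

-- ===== CLAIM (what is proved, stated in full; the proofs are below) =====
def Claim_equal_summarise_ffmpeg_error_py : Prop := ∀ (stderr : String), Dom_summarise_ffmpeg_error_py stderr → Spec_summarise_ffmpeg_error_py stderr (summarise_ffmpeg_error_py stderr)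

-- ===== LEMMAS AND PROOFS =====

-- stripped nonempty lines
def pvCands (lines : List String) : List String :=
  (lines.map PySem.Str.strip).filter (fun l => l != "")

-- "kw in line.lower()"
def pvHit (kw l : String) : Bool := PySem.Str.isIn kw (PySem.Str.lower l)

lemma pv_getLast?_cons (x : String) (t : List String) :
    (x :: t).getLast? = t.getLast?.or (some x) := by
  induction t generalizing x with
  | nil => rfl
  | cons y t ih =>
      rw [List.getLast?_cons_cons, ih y]
      cases t.getLast? <;> rfl

lemma pvStepB_blank (st : PySem.Dict String String × Option String) (raw : String)
    (h : PySem.Str.strip raw = "") : pvStepB st raw = st := by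
  simp [pvStepB, h]

lemma pvStepB_line (st : PySem.Dict String String × Option String) (raw : String)
    (h : ¬ PySem.Str.strip raw = "") :
    pvStepB st raw =
      (pvPriority.foldl
        (fun d kw => if pvHit kw (PySem.Str.strip raw) then d.insert kw (PySem.Str.strip raw) else d)
        st.1,
       some (PySem.Str.strip raw)) := by
  simp [pvStepB, pvHit, h]

lemma pv_cands_cons_blank (raw : String) (rest : List String)
    (h : PySem.Str.strip raw = "") : pvCands (raw :: rest) = pvCands rest := by
  simp [pvCands, h]

lemma pv_cands_cons_line (raw : String) (rest : List String)
    (h : ¬ PySem.Str.strip raw = "") :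
    pvCands (raw :: rest) = PySem.Str.strip raw :: pvCands rest := by
  simp [pvCands, h]

-- inner keyword loop: conditional inserts over the keyword list, looked up at kw
lemma pv_inner_get? (ks : List String) (d : PySem.Dict String String) (line kw : String)
    (p : String → Bool) :
    (ks.foldl (fun d k => if p k then d.insert k line else d) d).get? kw
      = if kw ∈ ks ∧ p kw then some line else d.get? kw := by
  induction ks generalizing d with
  | nil => simp
  | cons k ks ih =>
      rw [List.foldl_cons, ih]
      by_cases hks : kw ∈ ks ∧ p kw = true
      · rw [if_pos hks, if_pos ⟨List.mem_cons_of_mem _ hks.1, hks.2⟩]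
      · rw [if_neg hks]
        by_cases hpk : p k = true
        · rw [if_pos hpk, PySem.Dict.get?_insert]
          by_cases hk : kw = k
          · rw [if_pos hk, if_pos ⟨by simp [hk], hk ▸ hpk⟩]
          · rw [if_neg hk, if_neg]
            rintro ⟨hm, hp⟩
            rcases List.mem_cons.mp hm with h1 | h1
            · exact hk h1
            · exact hks ⟨h1, hp⟩
        · rw [if_neg hpk, if_neg]
          rintro ⟨hm, hp⟩
          rcases List.mem_cons.mp hm with h1 | h1
          · exact hpk (h1 ▸ hp)
          · exact hks ⟨h1, hp⟩

-- the `last` accumulator ends as the last candidate (or the initial value)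
lemma pv_snd_foldl (lines : List String) (d0 : PySem.Dict String String) (l0 : Option String) :
    (lines.foldl pvStepB (d0, l0)).2 = (pvCands lines).getLast?.or l0 := by
  induction lines generalizing d0 l0 with
  | nil => simp [pvCands]
  | cons raw rest ih =>
      by_cases h : PySem.Str.strip raw = ""
      · rw [List.foldl_cons, pvStepB_blank _ _ h, ih, pv_cands_cons_blank _ _ h]
      · rw [List.foldl_cons, pvStepB_line _ _ h, ih, pv_cands_cons_line _ _ h,
          pv_getLast?_cons, Option.or_assoc, Option.some_or]

-- the dict entry of a priority keyword ends as the last matching candidate (or the initial entry)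
lemma pv_fst_foldl (lines : List String) (d0 : PySem.Dict String String) (l0 : Option String)
    (kw : String) (hkw : kw ∈ pvPriority) :
    (lines.foldl pvStepB (d0, l0)).1.get? kw
      = ((pvCands lines).reverse.find? (fun l => pvHit kw l)).or (d0.get? kw) := by
  induction lines generalizing d0 l0 with
  | nil => simp [pvCands]
  | cons raw rest ih =>
      by_cases h : PySem.Str.strip raw = ""
      · rw [List.foldl_cons, pvStepB_blank _ _ h, ih, pv_cands_cons_blank _ _ h]
      · rw [List.foldl_cons, pvStepB_line _ _ h, ih, pv_cands_cons_line _ _ h,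
          List.reverse_cons, List.find?_append, pv_inner_get?]
        by_cases hp : pvHit kw (PySem.Str.strip raw) = true
        · rw [if_pos ⟨hkw, hp⟩, List.find?_singleton]
          simp only [hp, if_pos]
          rw [Option.or_assoc, Option.some_or]
        · rw [if_neg (fun hc => hp hc.2), List.find?_singleton]
          simp only [hp, Bool.false_eq_true, if_false]
          rw [Option.or_assoc, Option.none_or]

lemma pv_findSome?_congr {α β : Type} (l : List α) (f g : α → Option β)
    (h : ∀ x ∈ l, f x = g x) : l.findSome? f = l.findSome? g := by
  induction l with
  | nil => rfl
  | cons x t ih =>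
      rw [List.findSome?_cons, List.findSome?_cons, h x (by simp),
        ih (fun y hy => h y (by simp [hy]))]

-- ===== VERDICT (by name: the statement is the Claim_ definition above) =====
theorem summarise_ffmpeg_error_py_spec : Claim_equal_summarise_ffmpeg_error_py := by
  intro stderr _
  unfold Spec_summarise_ffmpeg_error_py summarise_ffmpeg_error_py summarise_ffmpeg_error_py_alt
  by_cases hs : stderr = ""
  · subst hs; decide
  · rw [if_neg hs]
    have hfind : pvPriority.findSome?
        (fun kw => ((PySem.Str.splitlines stderr).foldl pvStepB (PySem.Dict.empty, none)).1.get? kw)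
        = pvPriority.findSome?
            (fun kw => (pvCands (PySem.Str.splitlines stderr)).reverse.find? (fun l => pvHit kw l)) := by
      apply pv_findSome?_congr
      intro kw hkw
      rw [pv_fst_foldl _ _ _ kw hkw]
      simp
    have hsnd := pv_snd_foldl (PySem.Str.splitlines stderr) PySem.Dict.empty none
    simp only [hfind, hsnd, Option.or_none]
    rfl
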